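-- pv_equiv track=rewrite | github.com/FrancescoPannozzo/network_traffic_visualizer | utils/graphic_visualizer_utils.py | traffic_colors_gen
-- ===== SOURCE A (Python) =====
-- def traffic_colors_gen(r, g, b):
--     """ A traffic colors generator, green to yellow to red
--
--     Returns:
--     dict -- a dictionary with keys as percentage number and values as hex color
--     """
--     MID_TRAFFIC = 50
--     MAX_TRAFFIC = 100
--     hexColors = {}
--
--     for i in range(0, MAX_TRAFFIC+1):
--         if i <= MID_TRAFFIC:
--             r += 5
--         else:
--             g -= 5
--         hexColors[i] = {"hexValue": hex_converter(r, g, b)}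
--
--     return hexColors
--
-- def hex_converter(r, g, b):
--     """ Translate r, g, b code in hex format
--
--     Returns:
--     string -- hex color string representation
--     """
--     return '#{:02x}{:02x}{:02x}'.format(r, g, b)
-- ===== SOURCE B (Python) =====
-- def hex_converter(r, g, b):
--     return '#{:02x}{:02x}{:02x}'.format(r, g, b)
--
-- def traffic_colors_gen(r, g, b):
--     first = {i: {"hexValue": hex_converter(r + 5 * (i + 1), g, b)} for i in range(0, 51)}
--     second = {i: {"hexValue": hex_converter(r + 255, g - 5 * (i - 50), b)} for i in range(51, 101)}
--     return {**first, **second}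
-- ===== Notes on version B (the rewrite author's own statement) =====
-- stated objective: simpler
-- what changed: Replaced the single loop with mutable r/g accumulators and a per-iteration branch by two closed-form dict comprehensions (keys 0..50 and 51..100) whose r/g values are computed directly from the index.
import Mathlib
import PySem

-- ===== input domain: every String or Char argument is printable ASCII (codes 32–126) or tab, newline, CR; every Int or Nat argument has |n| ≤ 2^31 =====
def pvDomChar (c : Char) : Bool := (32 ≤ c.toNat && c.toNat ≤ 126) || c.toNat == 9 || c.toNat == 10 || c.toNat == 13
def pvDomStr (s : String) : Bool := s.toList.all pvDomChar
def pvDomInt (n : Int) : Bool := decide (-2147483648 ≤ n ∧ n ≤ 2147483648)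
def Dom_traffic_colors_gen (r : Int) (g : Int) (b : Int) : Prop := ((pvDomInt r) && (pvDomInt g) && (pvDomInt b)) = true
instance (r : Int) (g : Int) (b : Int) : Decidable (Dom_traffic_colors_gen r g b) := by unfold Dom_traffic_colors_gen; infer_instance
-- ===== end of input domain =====

-- B replaces A's mutable r/g accumulators and per-iteration branch with two closed-form
-- dict comprehensions computed from the index (objective: simpler decomposition, same cost).

-- ===== PORT A =====
-- '{:02x}'.format(n): lowercase hex, zero-padded to total width 2 (the '-' of a negative
-- counts toward the width, padding zeros go between sign and digits) — Python-exact by hand.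
def fmt02xChars (n : Int) : List Char :=
  if n < 0 then
    let ds := Nat.toDigits 16 n.natAbs
    '-' :: (List.replicate (1 - ds.length) '0' ++ ds)
  else
    let ds := Nat.toDigits 16 n.toNat
    List.replicate (2 - ds.length) '0' ++ ds

-- hex_converter(r, g, b) = '#{:02x}{:02x}{:02x}'.format(r, g, b)
def hex_converter (r : Int) (g : Int) (b : Int) : String :=
  String.ofList ('#' :: (fmt02xChars r ++ fmt02xChars g ++ fmt02xChars b))

-- one iteration of A's loop body over the state (r, g, hexColors)
def tcgStep (b : Int) (st : Int × Int × PySem.Dict Int (List (String × String))) (i : Int) :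
    Int × Int × PySem.Dict Int (List (String × String)) :=
  if i ≤ 50 then
    let r := st.1 + 5
    (r, st.2.1, st.2.2.insert i [("hexValue", hex_converter r st.2.1 b)])
  else
    let g := st.2.1 - 5
    (st.1, g, st.2.2.insert i [("hexValue", hex_converter st.1 g b)])

def traffic_colors_gen (r : Int) (g : Int) (b : Int) : List (Int × List (String × String)) :=
  (((PySem.List.pyRange 0 101 1).foldl (tcgStep b) (r, g, PySem.Dict.empty)).2.2).items

-- ===== PORT B =====
def traffic_colors_gen_alt (r : Int) (g : Int) (b : Int) : List (Int × List (String × String)) :=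
  ((PySem.List.pyRange 0 51 1).map
      (fun i => (i, [("hexValue", hex_converter (r + 5 * (i + 1)) g b)])))
  ++ ((PySem.List.pyRange 51 101 1).map
      (fun i => (i, [("hexValue", hex_converter (r + 255) (g - 5 * (i - 50)) b)])))

-- ===== PRECONDITION & SPEC =====
def Spec_traffic_colors_gen (r : Int) (g : Int) (b : Int) (out : List (Int × List (String × String))) : Prop := out = traffic_colors_gen_alt r g b
instance (r : Int) (g : Int) (b : Int) (out : List (Int × List (String × String))) : Decidable (Spec_traffic_colors_gen r g b out) := by unfold Spec_traffic_colors_gen; infer_instance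

-- ===== CLAIM (what is proved, stated in full; the proofs are below) =====
def Claim_equal_traffic_colors_gen : Prop := ∀ (r : Int) (g : Int) (b : Int), Dom_traffic_colors_gen r g b → Spec_traffic_colors_gen r g b (traffic_colors_gen r g b)

-- ===== LEMMAS AND PROOFS =====

-- first phase (i = 0 .. n-1 ≤ 50): r grows by 5 each step, g untouched, fresh keys append
lemma tcg_phase1 (r g b : Int) :
    ∀ n : Nat, n ≤ 51 →
      ((List.range n).map (fun (k : Nat) => (k : Int))).foldl (tcgStep b) (r, g, PySem.Dict.empty)
      = (r + 5 * n, g,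
         PySem.Dict.mk ((List.range n).map
           (fun (k : Nat) => ((k : Int), [("hexValue", hex_converter (r + 5 * (k + 1)) g b)])))) := by
  intro n hn
  induction n with
  | zero => simp [PySem.Dict.empty]
  | succ m ih =>
    have hm : m ≤ 51 := by omega
    rw [List.range_succ, List.map_append, List.foldl_append, ih hm]
    have hle : ((m : Int)) ≤ 50 := by exact_mod_cast (by omega : m ≤ 50)
    have hfresh : (PySem.Dict.mk ((List.range m).map
        (fun (k : Nat) => ((k : Int), [("hexValue", hex_converter (r + 5 * (k + 1)) g b)])))).contains (m : Int) = false := by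
      rw [Bool.eq_false_iff]
      intro hc
      rw [PySem.Dict.contains_iff_mem_keys] at hc
      simp only [PySem.Dict.keys_mk, List.map_map, List.mem_map, List.mem_range] at hc
      obtain ⟨k, hk, hkm⟩ := hc
      simp only [Function.comp] at hkm
      have : k = m := by exact_mod_cast hkm
      omega
    simp only [List.map_cons, List.map_nil, List.foldl_cons, List.foldl_nil, tcgStep, if_pos hle, Prod.mk.injEq]
    refine ⟨by push_cast; ring, trivial, ?_⟩
    apply PySem.Dict.ext
    rw [PySem.Dict.items_insert_of_not_contains _ _ hfresh]
    show _ ++ _ = List.map _ _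
    rw [List.map_append]
    congr 1
    have h5 : r + 5 * (m:Int) + 5 = r + 5 * ((m:Int) + 1) := by ring
    rw [List.map_cons, List.map_nil, h5]

-- second phase (i = 51 + k, k = 0 .. n-1): r fixed, g drops by 5 each step, keys append
lemma tcg_phase2 (rv g b : Int) :
    ∀ (n : Nat), n ≤ 50 → ∀ (l : List (Int × List (String × String))),
      (∀ p ∈ l, p.1 < 51) →
      ((List.range n).map (fun (k : Nat) => (51 + (k : Int)))).foldl (tcgStep b) (rv, g, PySem.Dict.mk l)
      = (rv, g - 5 * n,
         PySem.Dict.mk (l ++ (List.range n).map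
           (fun (k : Nat) => ((51 + (k : Int)), [("hexValue", hex_converter rv (g - 5 * (k + 1)) b)])))) := by
  intro n hn
  induction n with
  | zero => intro l _; simp
  | succ m ih =>
    intro l hl
    have hm : m ≤ 50 := by omega
    rw [List.range_succ, List.map_append, List.foldl_append, ih hm l hl]
    have hgt : ¬ ((51 + (m : Int)) ≤ 50) := by
      have : (0:Int) ≤ (m : Int) := Int.natCast_nonneg m
      omega
    have hfresh : (PySem.Dict.mk (l ++ (List.range m).map
        (fun (k : Nat) => ((51 + (k : Int)), [("hexValue", hex_converter rv (g - 5 * (k + 1)) b)])))).contains (51 + (m : Int)) = false := by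
      rw [Bool.eq_false_iff]
      intro hc
      rw [PySem.Dict.contains_iff_mem_keys] at hc
      simp only [PySem.Dict.keys_mk, List.map_append, List.mem_append, List.map_map,
        List.mem_map, List.mem_range] at hc
      rcases hc with hc | hc
      · obtain ⟨p, hp, hpe⟩ := hc
        have := hl p hp
        have h0 : (0:Int) ≤ (m : Int) := Int.natCast_nonneg m
        omega
      · obtain ⟨k, hk, hkm⟩ := hc
        simp only [Function.comp] at hkm
        have : (k : Int) = (m : Int) := by omega
        have : k = m := by exact_mod_cast this
        omega
    simp only [List.map_cons, List.map_nil, List.foldl_cons, List.foldl_nil, tcgStep, if_neg hgt, Prod.mk.injEq]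
    refine ⟨trivial, by push_cast; ring, ?_⟩
    apply PySem.Dict.ext
    rw [PySem.Dict.items_insert_of_not_contains _ _ hfresh]
    show (_ ++ _) ++ _ = _ ++ List.map _ _
    rw [List.map_append, List.append_assoc]
    congr 2
    have h5 : g - 5 * (m:Int) - 5 = g - 5 * ((m:Int) + 1) := by ring
    rw [List.map_cons, List.map_nil, h5]

-- ===== VERDICT (by name: the statement is the Claim_ definition above) =====
theorem traffic_colors_gen_spec : Claim_equal_traffic_colors_gen := by
  intro r g b _
  show traffic_colors_gen r g b = traffic_colors_gen_alt r g b
  unfold traffic_colors_gen traffic_colors_gen_alt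
  rw [PySem.List.pyRange_one_append 0 51 101 (by norm_num) (by norm_num)]
  rw [List.foldl_append]
  rw [show PySem.List.pyRange 0 51 1 = (List.range 51).map (fun (k : Nat) => (k : Int)) by
        rw [PySem.List.pyRange_one]; norm_num; rfl]
  rw [show PySem.List.pyRange 51 101 1 = (List.range 50).map (fun (k : Nat) => (51 + (k : Int))) by
        rw [PySem.List.pyRange_one]; norm_num; rfl]
  rw [tcg_phase1 r g b 51 (by norm_num)]
  rw [tcg_phase2 (r + 5 * ((51:Nat) : Int)) g b 50 (by norm_num) _
        (by
          intro p hp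
          simp only [List.mem_map, List.mem_range] at hp
          obtain ⟨k, hk, hke⟩ := hp
          rw [← hke]
          show ((k : Nat) : Int) < 51
          exact_mod_cast (by omega : k < 51))]
  dsimp only
  simp only [List.map_map, Function.comp_def]
  congr 1
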